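-- pv_equiv track=rewrite | github.com/pypi-data/pypi-mirror-90 | packages/dada-text/dada_text-0.0.9.tar.gz/dada_text-0.0.9/dada_text/core.py | is_not_int
-- ===== SOURCE A (Python) =====
-- import string
-- from typing import List
-- from typing import Any, List, Set, Union
--
-- DIGITS = frozenset(string.digits)
--
-- TEXT_PARAM = ":param text: the text to transform"
--
-- def is_digit(text: str, digits: Union[List[str], Set[str]] = DIGITS) -> bool:
--     f"""
--     Return true if this text is a digits character
--     {TEXT_PARAM}
--     :param digits: An optional list of digits characters check against
--     :return bool
--     """
--     return text in digits
--
-- def is_not_int(text: str, digits: Union[List[str], Set[str]] = DIGITS) -> bool: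
--     f"""
--     Return true if this text is definitely not integer (no characters are numeric)
--     This is a faster check then `is_int` because it breaks once it finds a non-digit character
--     We use this internally to distinguish between ids/slugs in api requests
--     {TEXT_PARAM}
--     :param digits: An optional list of digits characters check against
--     :return bool
--     """
--     for c in text:
--         if not is_digit(c, digits):
--             return True
--     return False
-- ===== SOURCE B (Python) =====
-- import string
-- from typing import Any, List, Set, Union
--
-- DIGITS = frozenset(string.digits)
--
-- def is_not_int(text: str, digits: Union[List[str], Set[str]] = DIGITS) -> bool:
--     """True iff text contains a character outside digits: set difference is non-empty."""
--     return bool(set(text).difference(digits))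
-- ===== Notes on version B (the rewrite author's own statement) =====
-- stated objective: simpler
-- what changed: Replaced the explicit per-character loop with early-exit membership tests by a single C-level set-difference of the text's character set against the digit set, returning its truthiness.
import Mathlib
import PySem

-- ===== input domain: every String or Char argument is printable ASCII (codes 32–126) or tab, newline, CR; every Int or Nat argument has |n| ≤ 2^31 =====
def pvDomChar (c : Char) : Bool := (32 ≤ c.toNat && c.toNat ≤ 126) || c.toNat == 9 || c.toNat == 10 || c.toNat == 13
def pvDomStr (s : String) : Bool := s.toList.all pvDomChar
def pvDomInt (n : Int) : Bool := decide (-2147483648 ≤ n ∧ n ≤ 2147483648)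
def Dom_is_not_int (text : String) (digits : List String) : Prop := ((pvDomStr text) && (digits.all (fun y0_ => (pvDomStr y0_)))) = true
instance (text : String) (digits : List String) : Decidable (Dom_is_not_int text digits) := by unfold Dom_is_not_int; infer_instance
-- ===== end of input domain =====

-- B replaces A's per-character loop with early exit by one set-difference test; objective: simpler.
-- ===== PORT A =====
def is_digit (text : String) (digits : List String) : Bool := digits.contains text

def is_not_int_loop (digits : List String) : List Char → Bool
  | [] => false
  | c :: rest => if !(is_digit (String.ofList [c]) digits) then true else is_not_int_loop digits rest

def is_not_int (text : String) (digits : List String) : Bool :=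
  is_not_int_loop digits text.toList

-- ===== PORT B =====
def is_not_int_alt (text : String) (digits : List String) : Bool :=
  !(PySem.Set.diff (PySem.Set.ofList (text.toList.map (fun c => String.ofList [c]))) digits).isEmpty

-- ===== PRECONDITION & SPEC =====
def Spec_is_not_int (text : String) (digits : List String) (out : Bool) : Prop := out = is_not_int_alt text digits
instance (text : String) (digits : List String) (out : Bool) : Decidable (Spec_is_not_int text digits out) := by unfold Spec_is_not_int; infer_instance

-- ===== CLAIM (what is proved, stated in full; the proofs are below) =====
def Claim_equal_is_not_int : Prop := ∀ (text : String) (digits : List String), Dom_is_not_int text digits → Spec_is_not_int text digits (is_not_int text digits)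

-- ===== LEMMAS AND PROOFS =====

-- ===== VERDICT (by name: the statement is the Claim_ definition above) =====
lemma loop_eq_any (digits : List String) (l : List Char) :
    is_not_int_loop digits l = l.any (fun c => !(is_digit (String.ofList [c]) digits)) := by
  induction l with
  | nil => rfl
  | cons c rest ih =>
    simp only [is_not_int_loop, List.any_cons]
    by_cases h : is_digit (String.ofList [c]) digits <;> simp [h, ih]

theorem is_not_int_spec : Claim_equal_is_not_int := by
  intro text digits _
  unfold Spec_is_not_int is_not_int is_not_int_alt
  rw [loop_eq_any]
  rw [Bool.eq_iff_iff]
  simp only [List.any_eq_true, Bool.not_eq_true', List.isEmpty_eq_false_iff, ne_eq]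
  constructor
  · rintro ⟨c, hc, hnd⟩ he
    have hm : String.ofList [c] ∈ PySem.Set.diff (PySem.Set.ofList (text.toList.map (fun c => String.ofList [c]))) digits := by
      rw [PySem.Set.mem_diff, PySem.Set.mem_ofList]
      refine ⟨List.mem_map.mpr ⟨c, hc, rfl⟩, ?_⟩
      simpa [is_digit, List.contains_iff_mem] using hnd
    rw [he] at hm
    simp at hm
  · intro h
    rcases List.exists_mem_of_ne_nil _ h with ⟨s, hs⟩
    rw [PySem.Set.mem_diff, PySem.Set.mem_ofList] at hs
    rcases hs with ⟨hmem, hnot⟩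
    rcases List.mem_map.mp hmem with ⟨c, hc, rfl⟩
    exact ⟨c, hc, by simpa [is_digit, List.contains_iff_mem] using hnot⟩
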